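-- pv_equiv track=rewrite | github.com/peterdoyle1717/undented | src/clusters.py | cluster_info
-- ===== SOURCE A (Python) =====
-- def cluster_info(verts, faces, cluster):
--     """For a cluster of face indices, count vertices and interior deg-6."""
--     cluster_faces = [faces[i] for i in cluster]
--     cluster_verts = set()
--     for f in cluster_faces:
--         cluster_verts.update(f)
--
--     # Vertex degree within cluster
--     deg = {v: 0 for v in cluster_verts}
--     nbrs = {v: set() for v in cluster_verts}
--     for f in cluster_faces:
--         for u, v in [(f[0],f[1]),(f[1],f[2]),(f[0],f[2])]:
--             nbrs[u].add(v); nbrs[v].add(u)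
--     for v in cluster_verts:
--         deg[v] = len(nbrs[v])
--
--     # Boundary of cluster: edges that appear in only one cluster face
--     edge_count = {}
--     for f in cluster_faces:
--         for u, v in [(f[0],f[1]),(f[1],f[2]),(f[0],f[2])]:
--             e = (min(u,v), max(u,v))
--             edge_count[e] = edge_count.get(e, 0) + 1
--     boundary_verts = set()
--     for e, c in edge_count.items():
--         if c == 1:
--             boundary_verts.add(e[0]); boundary_verts.add(e[1])
--
--     interior_verts = cluster_verts - boundary_verts
--     interior_deg6 = sum(1 for v in interior_verts if deg[v] == 6)
--
--     return len(cluster_faces), len(cluster_verts), len(boundary_verts), len(interior_verts), interior_deg6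
-- ===== SOURCE B (Python) =====
-- def cluster_info(verts, faces, cluster):
--     """For a cluster of face indices, count vertices and interior deg-6."""
--     cluster_faces = [faces[i] for i in cluster]
--
--     # One pass over the cluster faces: collect vertices and an edge-incidence
--     # table keyed by the normalized (min, max) edge.
--     cluster_verts = set()
--     edge_count = {}
--     for a, b, c in cluster_faces:
--         cluster_verts.update((a, b, c))
--         for e in ((min(a, b), max(a, b)), (min(b, c), max(b, c)), (min(a, c), max(a, c))):
--             edge_count[e] = edge_count.get(e, 0) + 1
--
--     # One pass over the distinct edges: derive degrees (each distinct edge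
--     # contributes 1 to each endpoint; a self-loop edge only once) and the
--     # boundary (edges appearing in exactly one face).
--     deg = {}
--     boundary_verts = set()
--     for (u, v), c in edge_count.items():
--         deg[u] = deg.get(u, 0) + 1
--         if u != v:
--             deg[v] = deg.get(v, 0) + 1
--         if c == 1:
--             boundary_verts.add(u)
--             boundary_verts.add(v)
--
--     interior_verts = cluster_verts - boundary_verts
--     interior_deg6 = sum(1 for v in interior_verts if deg.get(v, 0) == 6)
--
--     return len(cluster_faces), len(cluster_verts), len(boundary_verts), len(interior_verts), interior_deg6
-- ===== Notes on version B (the rewrite author's own statement) =====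
-- stated objective: simpler
-- what changed: Replaces A's per-vertex neighbor-set dictionary and its three separate face passes with a single edge-multiplicity table built in one pass over the cluster faces; degrees and the boundary are then both derived in one pass over the distinct edges (each distinct edge adds 1 to each endpoint, a self-loop once), so no set-of-neighbors structure is maintained.
import Mathlib
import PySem

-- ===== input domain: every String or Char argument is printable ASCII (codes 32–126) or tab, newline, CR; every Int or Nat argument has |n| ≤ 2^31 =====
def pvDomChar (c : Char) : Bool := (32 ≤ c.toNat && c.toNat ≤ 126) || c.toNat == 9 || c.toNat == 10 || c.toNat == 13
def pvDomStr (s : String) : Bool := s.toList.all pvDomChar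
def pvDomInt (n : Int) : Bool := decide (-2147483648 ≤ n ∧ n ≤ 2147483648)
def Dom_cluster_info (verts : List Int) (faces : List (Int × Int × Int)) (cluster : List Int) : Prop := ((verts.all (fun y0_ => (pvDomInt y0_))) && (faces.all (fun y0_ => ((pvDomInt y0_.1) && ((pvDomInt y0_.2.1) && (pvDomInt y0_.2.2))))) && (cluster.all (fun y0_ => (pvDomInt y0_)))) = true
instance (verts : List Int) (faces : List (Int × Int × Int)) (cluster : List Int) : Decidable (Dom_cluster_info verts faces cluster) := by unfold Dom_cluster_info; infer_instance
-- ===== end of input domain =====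

-- B replaces A's per-vertex neighbor-set dictionary (and its separate passes) by a single
-- edge-multiplicity table built in one pass over the faces, from whose distinct keys both the
-- degrees and the boundary are derived in one further pass (simpler; return values only, no mutation).

-- ===== PORT A =====
-- cluster_faces = [faces[i] for i in cluster]   (shared by both ports)
def pvClusterFaces (faces : List (Int × Int × Int)) (cluster : List Int) : List (Int × Int × Int) :=
  cluster.map (fun i => PySem.List.pyGetD faces i (0, 0, 0))

-- the inner pair list [(f[0],f[1]),(f[1],f[2]),(f[0],f[2])]
def pvPairs (f : Int × Int × Int) : List (Int × Int) := [(f.1, f.2.1), (f.2.1, f.2.2), (f.1, f.2.2)]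

-- e = (min(u,v), max(u,v))
def pvNorm (p : Int × Int) : Int × Int := (min p.1 p.2, max p.1 p.2)

-- cluster_verts: set(), updated with each face
def pvClusterVertsA (cf : List (Int × Int × Int)) : PySem.Set Int :=
  cf.foldl (fun s f => PySem.Set.update s [f.1, f.2.1, f.2.2]) PySem.Set.empty

-- deg = {v: 0 for v in cluster_verts}
def pvDeg0A (cv : PySem.Set Int) : PySem.Dict Int Int :=
  cv.foldl (fun d v => d.insert v (0 : Int)) PySem.Dict.empty

-- nbrs = {v: set() for v in cluster_verts}
def pvNbrs0A (cv : PySem.Set Int) : PySem.Dict Int (PySem.Set Int) :=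
  cv.foldl (fun d v => d.insert v PySem.Set.empty) PySem.Dict.empty

-- nbrs[u].add(v); nbrs[v].add(u)
def pvNbrStep (d : PySem.Dict Int (PySem.Set Int)) (p : Int × Int) : PySem.Dict Int (PySem.Set Int) :=
  (d.modify p.1 PySem.Set.empty (fun s => s.add p.2)).modify p.2 PySem.Set.empty (fun s => s.add p.1)

def pvNbrsA (cf : List (Int × Int × Int)) (cv : PySem.Set Int) : PySem.Dict Int (PySem.Set Int) :=
  cf.foldl (fun d f => (pvPairs f).foldl pvNbrStep d) (pvNbrs0A cv)

-- for v in cluster_verts: deg[v] = len(nbrs[v])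
def pvDegA (cf : List (Int × Int × Int)) (cv : PySem.Set Int) : PySem.Dict Int Int :=
  cv.foldl (fun d v => d.insert v ((PySem.Set.len ((pvNbrsA cf cv).getD v PySem.Set.empty) : Int))) (pvDeg0A cv)

-- edge_count[e] = edge_count.get(e, 0) + 1
def pvEdgeStep (d : PySem.Dict (Int × Int) Int) (p : Int × Int) : PySem.Dict (Int × Int) Int :=
  d.insert (pvNorm p) (d.getD (pvNorm p) 0 + 1)

def pvEdgeCountA (cf : List (Int × Int × Int)) : PySem.Dict (Int × Int) Int :=
  cf.foldl (fun d f => (pvPairs f).foldl pvEdgeStep d) PySem.Dict.empty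

-- if c == 1: boundary_verts.add(e[0]); boundary_verts.add(e[1])
def pvBoundStepA (s : PySem.Set Int) (ec : (Int × Int) × Int) : PySem.Set Int :=
  if ec.2 == 1 then (s.add ec.1.1).add ec.1.2 else s

def pvBoundaryA (cf : List (Int × Int × Int)) : PySem.Set Int :=
  (pvEdgeCountA cf).items.foldl pvBoundStepA PySem.Set.empty

def cluster_info (verts : List Int) (faces : List (Int × Int × Int)) (cluster : List Int) : Int × Int × Int × Int × Int :=
  let cf := pvClusterFaces faces cluster
  let cv := pvClusterVertsA cf
  let bd := pvBoundaryA cf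
  let iv := PySem.Set.diff cv bd
  ((cf.length : Int), (PySem.Set.len cv : Int), (PySem.Set.len bd : Int), (PySem.Set.len iv : Int),
    (iv.map (fun v => if (pvDegA cf cv).getD v 0 == 6 then (1 : Int) else 0)).sum)

-- ===== PORT B =====
-- the normalized edge tuple ((min(a,b),max(a,b)), (min(b,c),max(b,c)), (min(a,c),max(a,c)))
def pvNormEdges (f : Int × Int × Int) : List (Int × Int) :=
  [(min f.1 f.2.1, max f.1 f.2.1), (min f.2.1 f.2.2, max f.2.1 f.2.2), (min f.1 f.2.2, max f.1 f.2.2)]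

-- one pass over the faces: cluster_verts.update((a,b,c)); edge_count[e] = edge_count.get(e,0)+1
def pvScanStepB (st : PySem.Set Int × PySem.Dict (Int × Int) Int) (f : Int × Int × Int) :
    PySem.Set Int × PySem.Dict (Int × Int) Int :=
  (PySem.Set.update st.1 [f.1, f.2.1, f.2.2],
   (pvNormEdges f).foldl (fun d e => d.insert e (d.getD e 0 + 1)) st.2)

def pvScanB (cf : List (Int × Int × Int)) : PySem.Set Int × PySem.Dict (Int × Int) Int :=
  cf.foldl pvScanStepB (PySem.Set.empty, PySem.Dict.empty)

-- deg[u] = deg.get(u,0)+1; if u != v: deg[v] = deg.get(v,0)+1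
def pvDegStepB (d : PySem.Dict Int Int) (ec : (Int × Int) × Int) : PySem.Dict Int Int :=
  let d1 := d.insert ec.1.1 (d.getD ec.1.1 0 + 1)
  if ec.1.1 != ec.1.2 then d1.insert ec.1.2 (d1.getD ec.1.2 0 + 1) else d1

-- if c == 1: boundary_verts.add(u); boundary_verts.add(v)
def pvBoundStepB (s : PySem.Set Int) (ec : (Int × Int) × Int) : PySem.Set Int :=
  if ec.2 == 1 then (s.add ec.1.1).add ec.1.2 else s

-- one pass over the distinct edges: (deg, boundary_verts)
def pvDegBoundB (ec : PySem.Dict (Int × Int) Int) : PySem.Dict Int Int × PySem.Set Int :=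
  ec.items.foldl (fun st p => (pvDegStepB st.1 p, pvBoundStepB st.2 p)) (PySem.Dict.empty, PySem.Set.empty)

def cluster_info_alt (verts : List Int) (faces : List (Int × Int × Int)) (cluster : List Int) : Int × Int × Int × Int × Int :=
  let cf := pvClusterFaces faces cluster
  let sc := pvScanB cf
  let db := pvDegBoundB sc.2
  let iv := PySem.Set.diff sc.1 db.2
  ((cf.length : Int), (PySem.Set.len sc.1 : Int), (PySem.Set.len db.2 : Int), (PySem.Set.len iv : Int),
    (iv.map (fun v => if db.1.getD v 0 == 6 then (1 : Int) else 0)).sum)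

-- ===== PRECONDITION & SPEC =====
-- A raises IndexError on faces[i] when some cluster index is out of range; Pre_ excludes exactly that.
def Pre_cluster_info (verts : List Int) (faces : List (Int × Int × Int)) (cluster : List Int) : Prop :=
  ∀ i ∈ cluster, PySem.Raise.InRange faces.length i
instance (verts : List Int) (faces : List (Int × Int × Int)) (cluster : List Int) : Decidable (Pre_cluster_info verts faces cluster) := by unfold Pre_cluster_info; infer_instance

def pvWitness_cluster_info : List Int × (List (Int × Int × Int)) × List Int :=
  ([0, 1, 2], [(0, 1, 2), (0, 2, 3)], [0, 1, -1])

def Spec_cluster_info (verts : List Int) (faces : List (Int × Int × Int)) (cluster : List Int) (out : Int × Int × Int × Int × Int) : Prop := out = cluster_info_alt verts faces cluster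
instance (verts : List Int) (faces : List (Int × Int × Int)) (cluster : List Int) (out : Int × Int × Int × Int × Int) : Decidable (Spec_cluster_info verts faces cluster out) := by unfold Spec_cluster_info; infer_instance

-- ===== CLAIM (what is proved, stated in full; the proofs are below) =====
def Claim_equal_cluster_info : Prop := ∀ (verts : List Int) (faces : List (Int × Int × Int)) (cluster : List Int), Dom_cluster_info verts faces cluster → Pre_cluster_info verts faces cluster → Spec_cluster_info verts faces cluster (cluster_info verts faces cluster)

-- ===== LEMMAS AND PROOFS =====

-- B's fused face pass is the pair of A's vertex pass and A's edge-count pass.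
theorem pvScanB_eq (cf : List (Int × Int × Int)) :
    pvScanB cf = (pvClusterVertsA cf, pvEdgeCountA cf) := by
  unfold pvScanB
  have h : pvScanStepB = fun (st : PySem.Set Int × PySem.Dict (Int × Int) Int) f =>
      (PySem.Set.update st.1 [f.1, f.2.1, f.2.2], (pvPairs f).foldl pvEdgeStep st.2) := by
    funext st f
    simp [pvScanStepB, pvNormEdges, pvPairs, pvEdgeStep, pvNorm, List.foldl]
  rw [h]
  exact PySem.List.foldl_prod_mk (fun (s : PySem.Set Int) f => PySem.Set.update s [f.1, f.2.1, f.2.2])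
    (fun (d : PySem.Dict (Int × Int) Int) f => (pvPairs f).foldl pvEdgeStep d) cf
    PySem.Set.empty PySem.Dict.empty

-- B's fused edge pass is the pair of its degree pass and A's boundary pass.
theorem pvDegBoundB_eq (ec : PySem.Dict (Int × Int) Int) :
    pvDegBoundB ec = (ec.items.foldl pvDegStepB PySem.Dict.empty,
      ec.items.foldl pvBoundStepA PySem.Set.empty) := by
  unfold pvDegBoundB
  rw [PySem.List.foldl_prod_mk]
  rfl

-- a fold of key-determined inserts looked up afterwards
theorem pv_getD_foldl_insert_fun {ν : Type} (g : Int → ν) (l : List Int) (d : PySem.Dict Int ν) (v : Int) (d0 : ν) :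
    (l.foldl (fun d k => d.insert k (g k)) d).getD v d0 = if v ∈ l then g v else d.getD v d0 := by
  induction l generalizing d with
  | nil => simp
  | cons k t ih =>
    rw [List.foldl_cons, ih]
    by_cases h : v ∈ t
    · simp [h]
    · by_cases hv : v = k <;> simp [h, hv, PySem.Dict.getD_insert]

-- membership in the neighbor sets after A's pair loop
theorem pv_nbrs_mem (P : List (Int × Int)) (d : PySem.Dict Int (PySem.Set Int)) (u w : Int) :
    w ∈ (P.foldl pvNbrStep d).getD u PySem.Set.empty ↔
      w ∈ d.getD u PySem.Set.empty ∨ (u, w) ∈ P ∨ (w, u) ∈ P := by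
  induction P generalizing d with
  | nil => simp
  | cons p t ih =>
    rw [List.foldl_cons, ih]
    have hstep : w ∈ (pvNbrStep d p).getD u PySem.Set.empty ↔
        w ∈ d.getD u PySem.Set.empty ∨ (u, w) = p ∨ (w, u) = p := by
      obtain ⟨a, b⟩ := p
      unfold pvNbrStep
      simp only [PySem.Dict.getD_modify, Prod.ext_iff]
      split_ifs <;> simp_all [PySem.Set.mem_add]
    rw [hstep]
    simp only [List.mem_cons]
    tauto

-- the neighbor sets stay duplicate-free
theorem pv_nbrs_nodup (P : List (Int × Int)) (d : PySem.Dict Int (PySem.Set Int))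
    (h : ∀ u, (d.getD u PySem.Set.empty).Nodup) (u : Int) :
    ((P.foldl pvNbrStep d).getD u PySem.Set.empty).Nodup := by
  induction P generalizing d with
  | nil => exact h u
  | cons p t ih =>
    rw [List.foldl_cons]
    apply ih
    intro x
    unfold pvNbrStep
    rw [PySem.Dict.getD_modify]
    split_ifs with h1
    · apply PySem.Set.nodup_add
      rw [PySem.Dict.getD_modify]
      split_ifs with h2
      · exact PySem.Set.nodup_add _ _ (h _)
      · exact h _
    · rw [PySem.Dict.getD_modify]
      split_ifs with h2
      · exact PySem.Set.nodup_add _ _ (h _)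
      · exact h _

-- B's degree pass counts, for each vertex, the distinct edges incident to it
theorem pv_deg_fold (L : List ((Int × Int) × Int)) (d : PySem.Dict Int Int) (x : Int) :
    (L.foldl pvDegStepB d).getD x 0
      = d.getD x 0 + (L.countP (fun ec => ec.1.1 == x || ec.1.2 == x) : Int) := by
  induction L generalizing d with
  | nil => simp
  | cons ec t ih =>
    rw [List.foldl_cons, ih, List.countP_cons]
    have hstep : (pvDegStepB d ec).getD x 0
        = d.getD x 0 + (if ec.1.1 == x || ec.1.2 == x then (1 : Int) else 0) := by
      unfold pvDegStepB
      by_cases h12 : ec.1.1 = ec.1.2 <;> by_cases h1 : x = ec.1.1 <;> by_cases h2 : x = ec.1.2 <;>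
        simp [h12, h1, h2, PySem.Dict.getD_insert] <;> omega
    rw [hstep]
    by_cases hp : (ec.1.1 == x || ec.1.2 == x) = true <;> simp [hp] <;> omega

-- two pairs normalize alike iff they are the same unordered pair
theorem pv_norm_eq_iff (x y v w : Int) :
    pvNorm (x, y) = pvNorm (v, w) ↔ (x = v ∧ y = w) ∨ (x = w ∧ y = v) := by
  simp only [pvNorm, Prod.mk.injEq]
  omega

-- the other endpoint of an edge incident to v
def pvOther (v : Int) (e : Int × Int) : Int := if e.1 = v then e.2 else e.1

-- counting incident distinct normalized edges = size of the neighbor set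
theorem pv_count_eq_len (K : List (Int × Int)) (N : List Int) (v : Int)
    (hK : K.Nodup) (hnorm : ∀ e ∈ K, e.1 ≤ e.2) (hN : N.Nodup)
    (hmem : ∀ w, w ∈ N ↔ pvNorm (v, w) ∈ K) :
    N.length = K.countP (fun e => e.1 == v || e.2 == v) := by
  have hF : ∀ e ∈ K.filter (fun e => e.1 == v || e.2 == v), e.1 ≤ e.2 ∧ (e.1 = v ∨ e.2 = v) := by
    intro e he
    rw [List.mem_filter] at he
    refine ⟨hnorm e he.1, ?_⟩
    have h2 := he.2
    simp only [Bool.or_eq_true, beq_iff_eq] at h2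
    exact h2
  have hrecon : ∀ e ∈ K.filter (fun e => e.1 == v || e.2 == v), e = pvNorm (v, pvOther v e) := by
    intro e he
    obtain ⟨hle, hinc⟩ := hF e he
    obtain ⟨a, b⟩ := e
    simp only [pvOther, pvNorm] at *
    by_cases h1 : a = v <;> simp only [h1, if_true, if_false, Prod.mk.injEq] at hinc ⊢ <;>
      constructor <;> simp [h1] at * <;> omega
  have hmapnodup : ((K.filter (fun e => e.1 == v || e.2 == v)).map (pvOther v)).Nodup := by
    refine List.Nodup.map_on ?_ (hK.filter _)
    intro x hx y hy hxy
    rw [hrecon x hx, hrecon y hy, hxy]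
  have hmapmem : ∀ w, w ∈ (K.filter (fun e => e.1 == v || e.2 == v)).map (pvOther v) ↔ w ∈ N := by
    intro w
    rw [List.mem_map, hmem]
    constructor
    · rintro ⟨e, he, rfl⟩
      rw [← hrecon e he]
      exact (List.mem_filter.mp he).1
    · intro hKmem
      refine ⟨pvNorm (v, w), List.mem_filter.mpr ⟨hKmem, ?_⟩, ?_⟩
      · simp only [pvNorm, Bool.or_eq_true, beq_iff_eq]
        omega
      · simp only [pvOther, pvNorm]
        split_ifs with h1 <;> simp at h1 ⊢ <;> omega
  have hperm : N.Perm ((K.filter (fun e => e.1 == v || e.2 == v)).map (pvOther v)) :=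
    (List.perm_ext_iff_of_nodup hN hmapnodup).mpr (fun w => (hmapmem w).symm)
  rw [hperm.length_eq, List.length_map, List.countP_eq_length_filter]

-- the keys of A's edge-count dict are the distinct normalized pairs
theorem pv_edge_keys (cf : List (Int × Int × Int)) :
    (pvEdgeCountA cf).keys = PySem.Set.ofList ((cf.flatMap pvPairs).map pvNorm) := by
  unfold pvEdgeCountA
  rw [← List.foldl_flatMap]
  unfold pvEdgeStep
  rw [PySem.Dict.keys_foldl_insert_key (cf.flatMap pvPairs) pvNorm
      (fun d p => d.getD (pvNorm p) 0 + 1) PySem.Dict.empty]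
  simp [PySem.Set.update_nil_left]

-- degrees agree on cluster vertices
theorem pv_deg_agree (cf : List (Int × Int × Int)) (v : Int) (hv : v ∈ pvClusterVertsA cf) :
    (pvDegA cf (pvClusterVertsA cf)).getD v 0 = ((pvDegBoundB (pvEdgeCountA cf)).1).getD v 0 := by
  have hA : pvNbrsA cf (pvClusterVertsA cf)
      = (cf.flatMap pvPairs).foldl pvNbrStep (pvNbrs0A (pvClusterVertsA cf)) := by
    unfold pvNbrsA
    rw [← List.foldl_flatMap]
  have h0 : ∀ u, (pvNbrs0A (pvClusterVertsA cf)).getD u PySem.Set.empty = PySem.Set.empty := by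
    intro u
    unfold pvNbrs0A
    rw [pv_getD_foldl_insert_fun]
    split <;> simp [PySem.Dict.getD_empty]
  have hNmem : ∀ w, w ∈ (pvNbrsA cf (pvClusterVertsA cf)).getD v PySem.Set.empty ↔
      (v, w) ∈ cf.flatMap pvPairs ∨ (w, v) ∈ cf.flatMap pvPairs := by
    intro w
    rw [hA, pv_nbrs_mem, h0]
    simp [PySem.Set.empty]
  have hNnodup : ((pvNbrsA cf (pvClusterVertsA cf)).getD v PySem.Set.empty).Nodup := by
    rw [hA]
    exact pv_nbrs_nodup _ _ (fun u => by rw [h0]; exact List.nodup_nil) v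
  have hmem : ∀ w, w ∈ (pvNbrsA cf (pvClusterVertsA cf)).getD v PySem.Set.empty ↔
      pvNorm (v, w) ∈ (pvEdgeCountA cf).keys := by
    intro w
    rw [hNmem, pv_edge_keys, PySem.Set.mem_ofList, List.mem_map]
    constructor
    · rintro (h | h)
      · exact ⟨(v, w), h, rfl⟩
      · exact ⟨(w, v), h, (pv_norm_eq_iff w v v w).mpr (Or.inr ⟨rfl, rfl⟩)⟩
    · rintro ⟨p, hp, hpn⟩
      obtain ⟨a, b⟩ := p
      rcases (pv_norm_eq_iff a b v w).mp hpn with ⟨rfl, rfl⟩ | ⟨rfl, rfl⟩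
      · exact Or.inl hp
      · exact Or.inr hp
  have hnorm : ∀ e ∈ (pvEdgeCountA cf).keys, e.1 ≤ e.2 := by
    intro e he
    rw [pv_edge_keys, PySem.Set.mem_ofList, List.mem_map] at he
    obtain ⟨p, _, rfl⟩ := he
    simp [pvNorm]
  have hK : ((pvEdgeCountA cf).keys).Nodup := by
    rw [pv_edge_keys]
    exact PySem.Set.nodup_ofList _
  have hcount := pv_count_eq_len ((pvEdgeCountA cf).keys)
    ((pvNbrsA cf (pvClusterVertsA cf)).getD v PySem.Set.empty) v hK hnorm hNnodup hmem
  have hL : (pvDegA cf (pvClusterVertsA cf)).getD v 0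
      = ((PySem.Set.len ((pvNbrsA cf (pvClusterVertsA cf)).getD v PySem.Set.empty)) : Int) := by
    unfold pvDegA
    rw [pv_getD_foldl_insert_fun]
    simp [hv]
  have hR : ((pvDegBoundB (pvEdgeCountA cf)).1).getD v 0
      = (((pvEdgeCountA cf).items.countP (fun ec => ec.1.1 == v || ec.1.2 == v) : Nat) : Int) := by
    rw [pvDegBoundB_eq]
    exact (pv_deg_fold _ _ _).trans (by rw [PySem.Dict.getD_empty]; omega)
  have hkeys : (pvEdgeCountA cf).keys.countP (fun e => e.1 == v || e.2 == v)
      = (pvEdgeCountA cf).items.countP (fun ec => ec.1.1 == v || ec.1.2 == v) := by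
    show ((pvEdgeCountA cf).items.map (·.1)).countP (fun e => e.1 == v || e.2 == v) = _
    rw [List.countP_map]
    rfl
  rw [hL, hR, ← hkeys, ← hcount]
  simp [PySem.Set.len]

-- ===== VERDICT (by name: the statement is the Claim_ definition above) =====
theorem cluster_info_spec : Claim_equal_cluster_info := by
  intro verts faces cluster _ _
  unfold Spec_cluster_info
  show cluster_info verts faces cluster = cluster_info_alt verts faces cluster
  unfold cluster_info cluster_info_alt
  simp only [pvScanB_eq]
  have hbd : (pvDegBoundB (pvEdgeCountA (pvClusterFaces faces cluster))).2
      = pvBoundaryA (pvClusterFaces faces cluster) := by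
    rw [pvDegBoundB_eq]
    rfl
  rw [hbd]
  have hfun : ∀ v ∈ PySem.Set.diff (pvClusterVertsA (pvClusterFaces faces cluster))
      (pvBoundaryA (pvClusterFaces faces cluster)),
      (fun v => if (pvDegA (pvClusterFaces faces cluster)
          (pvClusterVertsA (pvClusterFaces faces cluster))).getD v 0 == 6 then (1 : Int) else 0) v
        = (fun v => if ((pvDegBoundB (pvEdgeCountA (pvClusterFaces faces cluster))).1).getD v 0 == 6
            then (1 : Int) else 0) v := by
    intro v hv
    simp only
    rw [pv_deg_agree _ v ((PySem.Set.mem_diff _ _ v).mp hv).1]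
  rw [List.map_congr_left hfun]
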